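-- pv_equiv track=rewrite | github.com/Rian-Freitas/sofya-chatbot-project | test.py | process_response
-- ===== SOURCE A (Python) =====
-- def process_response(response):
--     rows = response.split('\n')
--     open_list = False
--     result = []
--
--     for row in rows:
--         if row.startswith('-'):
--             if not open_list:
--                 result.append('<ul class="list">')
--                 open_list = True
--
--             item = row[2:]
--             result.append(f'<li>{item}</li>')
--
--         else:
--             if open_list:
--                 result.append('</ul>')
--                 open_list = False
--
--             result.append(row)
--
--     if open_list:
--         result.append('</ul>')
--
--     return ' '.join(result)
-- ===== SOURCE B (Python) =====
-- def process_response(response):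
--     rows = response.split('\n')
--     out = []
--     i = 0
--     n = len(rows)
--     while i < n:
--         if rows[i].startswith('-'):
--             j = i
--             while j < n and rows[j].startswith('-'):
--                 j += 1
--             out.append('<ul class="list">')
--             for row in rows[i:j]:
--                 out.append(f'<li>{row[2:]}</li>')
--             out.append('</ul>')
--             i = j
--         else:
--             out.append(rows[i])
--             i += 1
--     return ' '.join(out)
-- ===== Notes on version B (the rewrite author's own statement) =====
-- stated objective: alternative
-- what changed: Replaced the open_list boolean state machine (and its post-loop close) with run-based rendering: an index scan finds each maximal run of dash-prefixed lines and emits the whole <ul>...</ul> block at once.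
import Mathlib
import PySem

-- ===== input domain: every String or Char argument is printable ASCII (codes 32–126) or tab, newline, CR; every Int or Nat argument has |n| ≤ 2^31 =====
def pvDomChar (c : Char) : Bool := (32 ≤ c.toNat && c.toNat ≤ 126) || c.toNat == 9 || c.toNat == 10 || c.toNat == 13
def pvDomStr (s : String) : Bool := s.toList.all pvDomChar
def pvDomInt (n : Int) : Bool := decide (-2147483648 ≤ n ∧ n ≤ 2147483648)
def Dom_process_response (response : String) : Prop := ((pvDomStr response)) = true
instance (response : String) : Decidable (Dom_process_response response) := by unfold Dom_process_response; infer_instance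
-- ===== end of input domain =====

-- B replaces A's open_list state machine with run-based rendering of maximal dash runs (alternative decomposition, same cost).

-- ===== PORT A =====
-- the for-loop of A, carrying (open_list, result) as state; the trailing 'if open_list' close is the [] case
def pvALoop : List String → Bool → List String → List String
  | [], openl, res => if openl then res ++ ["</ul>"] else res
  | row :: rest, openl, res =>
    if PySem.Str.startswith row "-" then
      let res1 := if !openl then res ++ ["<ul class=\"list\">"] else res
      pvALoop rest true (res1 ++ ["<li>" ++ PySem.Str.slice row (some 2) none ++ "</li>"])
    else
      let res1 := if openl then res ++ ["</ul>"] else res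
      pvALoop rest false (res1 ++ [row])

def process_response (response : String) : String :=
  PySem.Str.join " " (pvALoop ((PySem.Str.split? response "\n").getD []) false [])

-- ===== PORT B =====
-- B's outer while loop: on a dash line, the inner while (takeWhile/dropWhile) finds the maximal run
def pvBGo : List String → List String
  | [] => []
  | r :: rs =>
    if PySem.Str.startswith r "-" then
      ("<ul class=\"list\">" ::
        ((r :: rs).takeWhile (fun s => PySem.Str.startswith s "-")).map
          (fun s => "<li>" ++ PySem.Str.slice s (some 2) none ++ "</li>"))
        ++ ["</ul>"] ++ pvBGo ((r :: rs).dropWhile (fun s => PySem.Str.startswith s "-"))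
    else
      r :: pvBGo rs
termination_by l => l.length
decreasing_by
  · simp_all [List.dropWhile]
    exact List.length_dropWhile_le _ _
  · simp

def process_response_alt (response : String) : String :=
  PySem.Str.join " " (pvBGo ((PySem.Str.split? response "\n").getD []))

-- ===== PRECONDITION & SPEC =====
def Spec_process_response (response : String) (out : String) : Prop := out = process_response_alt response
instance (response : String) (out : String) : Decidable (Spec_process_response response out) := by unfold Spec_process_response; infer_instance

-- ===== CLAIM (what is proved, stated in full; the proofs are below) =====
def Claim_equal_process_response : Prop := ∀ (response : String), Dom_process_response response → Spec_process_response response (process_response response)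

-- ===== LEMMAS AND PROOFS =====

lemma pvLoop_eq (rows : List String) : ∀ acc : List String,
    pvALoop rows false acc = acc ++ pvBGo rows ∧
    pvALoop rows true acc =
      acc ++ (rows.takeWhile (fun s => PySem.Str.startswith s "-")).map
          (fun s => "<li>" ++ PySem.Str.slice s (some 2) none ++ "</li>")
        ++ ["</ul>"] ++ pvBGo (rows.dropWhile (fun s => PySem.Str.startswith s "-")) := by
  induction rows with
  | nil => intro acc; simp [pvALoop, pvBGo]
  | cons r rs ih =>
    intro acc
    by_cases h : PySem.Str.startswith r "-" = true
    · constructor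
      · simp only [pvALoop, h, if_pos, Bool.not_false]
        rw [(ih _).2]
        simp at h
        simp [pvBGo, h, List.takeWhile, List.dropWhile]
      · simp only [pvALoop, h, if_pos, Bool.not_true, Bool.false_eq_true, if_false]
        rw [(ih _).2]
        simp at h
        simp [h, List.takeWhile, List.dropWhile]
    · simp only [Bool.not_eq_true] at h
      constructor
      · simp only [pvALoop, h, Bool.false_eq_true, if_false]
        rw [(ih _).1]
        simp at h
        simp [pvBGo, h]
      · simp only [pvALoop, h, Bool.false_eq_true, if_false, if_true]
        rw [(ih _).1]
        simp at h
        simp [pvBGo, h, List.takeWhile, List.dropWhile]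

-- ===== VERDICT (by name: the statement is the Claim_ definition above) =====
theorem process_response_spec : Claim_equal_process_response := by
  intro response _
  unfold Spec_process_response process_response process_response_alt
  rw [(pvLoop_eq _ []).1]
  simp
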